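-- pv_equiv track=rewrite | github.com/devcordde/adventofcode-23 | Day-03/python/paul2708/day03.py | next_number
-- ===== SOURCE A (Python) =====
-- def next_number(line, start_index):
--     num = ""
--     indices = []
--
--     for i in range(start_index, len(line)):
--         if line[i].isdigit():
--             num += line[i]
--             indices.append(i)
--
--         if not line[i].isdigit() and len(num) != 0:
--             return int(num), indices, i + 1
--
--     if len(num) != 0:
--         return int(num), indices, len(line)
--
--     return None, [], -1
-- ===== SOURCE B (Python) =====
-- def next_number(line, start_index):
--     n = len(line)
--     # phase 1: find the index of the first digit at or after start_index
--     s = None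
--     for i in range(start_index, n):
--         if line[i].isdigit():
--             s = i
--             break
--     if s is None:
--         return None, [], -1
--     # phase 2: advance e past the run of digits
--     e = s
--     while e < n and line[e].isdigit():
--         e += 1
--     value = int("".join(line[i] for i in range(s, e)))
--     return value, list(range(s, e)), (e + 1 if e < n else n)
-- ===== Notes on version B (the rewrite author's own statement) =====
-- stated objective: simpler
-- what changed: Replaced the single accumulate-as-you-go loop carrying a growing string and index list with two sequential index scans (find first digit, then advance past the digit run) and building the number string and index list from the index range at the end.
import Mathlib
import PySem

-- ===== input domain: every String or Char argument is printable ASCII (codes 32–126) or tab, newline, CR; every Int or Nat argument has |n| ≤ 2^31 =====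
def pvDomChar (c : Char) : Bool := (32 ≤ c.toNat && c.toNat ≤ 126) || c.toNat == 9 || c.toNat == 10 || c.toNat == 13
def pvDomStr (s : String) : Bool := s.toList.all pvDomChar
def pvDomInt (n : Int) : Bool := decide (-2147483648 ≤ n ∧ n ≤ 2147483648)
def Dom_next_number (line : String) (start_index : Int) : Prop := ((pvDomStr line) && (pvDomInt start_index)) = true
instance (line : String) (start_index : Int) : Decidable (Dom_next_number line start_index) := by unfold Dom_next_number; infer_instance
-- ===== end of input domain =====

-- B replaces A's accumulate-as-you-go loop by two index scans (find first digit, advance past the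
-- run) and builds the result from the index range at the end; same value everywhere A returns.

-- ===== PORT A =====
-- the for-loop of A with early return; state = (num, indices).
-- the 'none' branch of pyGet? is Python's IndexError, excluded by Pre_ below.
def nnGoA (cs : List Char) (n : Int) (idxs : List Int) (num : List Char) (inds : List Int) :
    Option Int × List Int × Int :=
  match idxs with
  | [] => if num ≠ [] then (PySem.Int.ofChars? num, inds, n) else (none, [], -1)
  | i :: rest =>
    match PySem.List.pyGet? cs i with
    | none => (none, [], -1)
    | some c =>
      let num' := if PySem.Chars.isdigit c then num ++ [c] else num
      let inds' := if PySem.Chars.isdigit c then inds ++ [i] else inds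
      if PySem.Chars.isdigit c = false ∧ num' ≠ [] then (PySem.Int.ofChars? num', inds', i + 1)
      else nnGoA cs n rest num' inds'

def next_number (line : String) (start_index : Int) : Option Int × List Int × Int :=
  let cs := line.toList
  nnGoA cs (cs.length : Int) (PySem.List.pyRange start_index (cs.length : Int) 1) [] []

-- ===== PORT B =====
-- phase 1: first index in the range holding a digit ('none' branch of pyGet? = IndexError, outside Pre_)
def nnFind (cs : List Char) (idxs : List Int) : Option Int :=
  match idxs with
  | [] => none
  | i :: rest =>
    match PySem.List.pyGet? cs i with
    | none => none
    | some c => if PySem.Chars.isdigit c then some i else nnFind cs rest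

-- phase 2: the while loop 'while e < n and line[e].isdigit(): e += 1'; fuel bounds the iterations
-- (the loop runs at most (n - e) times); the .getD ' ' default is never read inside Pre_.
def nnAdv (cs : List Char) (n : Int) (e : Int) : Nat → Int
  | 0 => e
  | fuel + 1 =>
    if e < n ∧ PySem.Chars.isdigit ((PySem.List.pyGet? cs e).getD ' ') then
      nnAdv cs n (e + 1) fuel
    else e

def next_number_alt (line : String) (start_index : Int) : Option Int × List Int × Int :=
  let cs := line.toList
  let n : Int := cs.length
  match nnFind cs (PySem.List.pyRange start_index n 1) with
  | none => (none, [], -1)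
  | some s =>
    let e := nnAdv cs n s (n - s).toNat
    (PySem.Int.ofChars? ((PySem.List.pyRange s e 1).map (fun i => (PySem.List.pyGet? cs i).getD ' ')),
     PySem.List.pyRange s e 1,
     if e < n then e + 1 else n)

-- ===== PRECONDITION & SPEC =====
-- A raises IndexError (line[i] with i < -len(line)) exactly when start_index < -len(line); B raises there too.
def Pre_next_number (line : String) (start_index : Int) : Prop :=
  -(line.toList.length : Int) ≤ start_index
instance (line : String) (start_index : Int) : Decidable (Pre_next_number line start_index) := by
  unfold Pre_next_number; infer_instance
def pvWitness_next_number : String × Int := ("a12b", 0)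
def Spec_next_number (line : String) (start_index : Int) (out : Option Int × List Int × Int) : Prop := out = next_number_alt line start_index
instance (line : String) (start_index : Int) (out : Option Int × List Int × Int) : Decidable (Spec_next_number line start_index out) := by unfold Spec_next_number; infer_instance

-- ===== CLAIM (what is proved, stated in full; the proofs are below) =====
def Claim_equal_next_number : Prop := ∀ (line : String) (start_index : Int), Dom_next_number line start_index → Pre_next_number line start_index → Spec_next_number line start_index (next_number line start_index)

-- ===== LEMMAS AND PROOFS =====

theorem nnAdv_ge (cs : List Char) (n e : Int) (fuel : Nat) : e ≤ nnAdv cs n e fuel := by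
  induction fuel generalizing e with
  | zero => simp [nnAdv]
  | succ f ih =>
    simp only [nnAdv]
    split
    · exact le_trans (by omega) (ih (e + 1))
    · exact le_refl e

theorem pyGet?_some_of_inrange (cs : List Char) (i : Int)
    (h1 : -(cs.length : Int) ≤ i) (h2 : i < (cs.length : Int)) :
    ∃ c, PySem.List.pyGet? cs i = some c := by
  cases hg : PySem.List.pyGet? cs i with
  | some c => exact ⟨c, rfl⟩
  | none =>
    rw [PySem.List.pyGet?_eq_none_iff] at hg
    exact absurd (by constructor <;> omega : PySem.Raise.InRange cs.length i) hg

-- accumulation invariant: once num is nonempty (all remaining behaviour is phase 2 of B)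
theorem nnGoA_accum (cs : List Char) (fuel : Nat) :
    ∀ (i : Int) (num : List Char) (inds : List Int),
    -(cs.length : Int) ≤ i → fuel = ((cs.length : Int) - i).toNat → num ≠ [] →
    nnGoA cs (cs.length : Int) (PySem.List.pyRange i (cs.length : Int) 1) num inds =
      (PySem.Int.ofChars? (num ++ (PySem.List.pyRange i (nnAdv cs (cs.length : Int) i fuel) 1).map
          (fun j => (PySem.List.pyGet? cs j).getD ' ')),
       inds ++ PySem.List.pyRange i (nnAdv cs (cs.length : Int) i fuel) 1,
       if nnAdv cs (cs.length : Int) i fuel < (cs.length : Int)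
         then nnAdv cs (cs.length : Int) i fuel + 1 else (cs.length : Int)) := by
  induction fuel with
  | zero =>
    intro i num inds hi hf hnum
    have hge : (cs.length : Int) ≤ i := by omega
    rw [PySem.List.pyRange_one_eq_nil hge]
    simp only [nnGoA, nnAdv, if_pos hnum]
    rw [PySem.List.pyRange_one_eq_nil (le_refl i), if_neg (by omega : ¬ i < (cs.length : Int))]
    simp
  | succ f ih =>
    intro i num inds hi hf hnum
    have hlt : i < (cs.length : Int) := by omega
    obtain ⟨c, hc⟩ := pyGet?_some_of_inrange cs i hi hlt
    rw [PySem.List.pyRange_one_cons hlt]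
    by_cases hd : PySem.Chars.isdigit c = true
    · -- digit: append and keep looping = B keeps advancing e
      have hstep : nnAdv cs (cs.length : Int) i (f + 1) = nnAdv cs (cs.length : Int) (i + 1) f := by
        simp [nnAdv, hlt, hc, hd]
      have hrec := ih (i + 1) (num ++ [c]) (inds ++ [i]) (by omega) (by omega) (by simp)
      have he1 : i + 1 ≤ nnAdv cs (cs.length : Int) (i + 1) f := nnAdv_ge cs _ _ f
      have hcons : PySem.List.pyRange i (nnAdv cs (cs.length : Int) (i + 1) f) 1 =
          i :: PySem.List.pyRange (i + 1) (nnAdv cs (cs.length : Int) (i + 1) f) 1 :=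
        PySem.List.pyRange_one_cons (by omega)
      simp only [nnGoA, hc, hd, if_true, hstep]
      rw [if_neg (by simp), hrec, hcons]
      simp [hc]
    · -- non-digit with nonempty num: A returns, B's while stops
      have hstop : nnAdv cs (cs.length : Int) i (f + 1) = i := by
        simp [nnAdv, hc, hd]
      simp only [nnGoA, hc]
      rw [if_neg hd, if_neg hd, if_pos ⟨by simpa using hd, hnum⟩, hstop,
        PySem.List.pyRange_one_eq_nil (le_refl i)]
      simp [hlt]

-- scanning invariant: num still empty (phase 1 of B)
theorem nnGoA_scan (cs : List Char) (fuel : Nat) :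
    ∀ (i : Int), -(cs.length : Int) ≤ i → fuel = ((cs.length : Int) - i).toNat →
    nnGoA cs (cs.length : Int) (PySem.List.pyRange i (cs.length : Int) 1) [] [] =
      (match nnFind cs (PySem.List.pyRange i (cs.length : Int) 1) with
       | none => (none, [], -1)
       | some s =>
         let e := nnAdv cs (cs.length : Int) s ((cs.length : Int) - s).toNat
         (PySem.Int.ofChars? ((PySem.List.pyRange s e 1).map
             (fun j => (PySem.List.pyGet? cs j).getD ' ')),
          PySem.List.pyRange s e 1,
          if e < (cs.length : Int) then e + 1 else (cs.length : Int))) := by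
  induction fuel with
  | zero =>
    intro i hi hf
    rw [PySem.List.pyRange_one_eq_nil (by omega)]
    simp [nnGoA, nnFind]
  | succ f ih =>
    intro i hi hf
    have hlt : i < (cs.length : Int) := by omega
    obtain ⟨c, hc⟩ := pyGet?_some_of_inrange cs i hi hlt
    rw [PySem.List.pyRange_one_cons hlt]
    by_cases hd : PySem.Chars.isdigit c = true
    · -- first digit found at i: switch to the accumulation invariant
      have hacc := nnGoA_accum cs f (i + 1) [c] [i] (by omega) (by omega) (by simp)
      have hfuel : ((cs.length : Int) - i).toNat = f + 1 := by omega
      have hstep : nnAdv cs (cs.length : Int) i (f + 1) = nnAdv cs (cs.length : Int) (i + 1) f := by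
        simp [nnAdv, hlt, hc, hd]
      have he1 : i + 1 ≤ nnAdv cs (cs.length : Int) (i + 1) f := nnAdv_ge cs _ _ f
      have hcons : PySem.List.pyRange i (nnAdv cs (cs.length : Int) (i + 1) f) 1 =
          i :: PySem.List.pyRange (i + 1) (nnAdv cs (cs.length : Int) (i + 1) f) 1 :=
        PySem.List.pyRange_one_cons (by omega)
      simp only [nnGoA, nnFind, hc, hd, if_true]
      rw [if_neg (by simp)]
      simp only [List.nil_append]
      rw [hfuel, hstep, hacc, hcons]
      simp [hc]
    · -- not a digit, nothing accumulated: both sides skip i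
      simp only [nnGoA, nnFind, hc, hd]
      rw [if_neg (by simp), if_neg (by simp)]
      exact ih (i + 1) (by omega) (by omega)

-- ===== VERDICT (by name: the statement is the Claim_ definition above) =====
theorem next_number_spec : Claim_equal_next_number := by
  intro line start_index _ hpre
  unfold Spec_next_number next_number next_number_alt
  exact nnGoA_scan line.toList ((line.toList.length : Int) - start_index).toNat start_index hpre rfl
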